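-- pv_equiv track=rewrite | github.com/amitcjmu/Stock-Analysis | backend/app/services/collection_gaps/conflict_detection_service.py | _has_conflict
-- ===== SOURCE A (Python) =====
-- from typing import List, Dict, Any, Optional
--
-- def _has_conflict(sources: List[Dict[str, Any]]) -> bool:
--     """
--     Check if the sources contain conflicting values.
--
--     Args:
--         sources: List of source data dictionaries
--
--     Returns:
--         True if there are conflicting values, False otherwise
--     """
--     if len(sources) <= 1:
--         return False
--
--     # Get unique values (case-insensitive comparison)
--     unique_values = set()
--     for source in sources:
--         value = str(source.get("value", "")).strip().lower()
--         if value:  # Only consider non-empty values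
--             unique_values.add(value)
--
--     # Conflict exists if there are multiple unique values
--     return len(unique_values) > 1
-- ===== SOURCE B (Python) =====
-- def _has_conflict(sources):
--     # Track only the first non-empty normalized value; any later different one is a conflict.
--     first = None
--     for source in sources:
--         value = str(source.get("value", "")).strip().lower()
--         if not value:
--             continue
--         if first is None:
--             first = value
--         elif value != first:
--             return True
--     return False
-- ===== Notes on version B (the rewrite author's own statement) =====
-- stated objective: simpler
-- what changed: Replaces the set of all distinct normalized values plus a final cardinality test with a single tracked first non-empty value and an early return on the first differing value; the len(sources)<=1 guard disappears as it is subsumed.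
import Mathlib
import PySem

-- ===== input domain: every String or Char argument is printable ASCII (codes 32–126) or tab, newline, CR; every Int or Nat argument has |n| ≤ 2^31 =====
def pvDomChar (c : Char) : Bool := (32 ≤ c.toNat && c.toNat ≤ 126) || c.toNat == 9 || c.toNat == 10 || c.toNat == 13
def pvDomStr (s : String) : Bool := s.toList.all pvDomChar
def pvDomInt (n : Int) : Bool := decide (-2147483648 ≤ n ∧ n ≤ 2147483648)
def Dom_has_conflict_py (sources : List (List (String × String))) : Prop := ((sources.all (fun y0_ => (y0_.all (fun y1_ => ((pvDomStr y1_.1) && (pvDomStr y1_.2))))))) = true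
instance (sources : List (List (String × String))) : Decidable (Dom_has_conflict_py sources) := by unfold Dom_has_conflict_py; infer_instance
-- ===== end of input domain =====

-- B tracks only the first non-empty normalized value and returns early on a differing one,
-- instead of accumulating a set of all distinct values and testing its size (objective: simpler).

-- shared normalization: str(source.get("value","")).strip().lower() (str() is identity on String values)
def pvNorm (source : List (String × String)) : String :=
  PySem.Str.lower (PySem.Str.strip (PySem.Dict.getD (PySem.Dict.mk source) "value" ""))

-- ===== PORT A =====
def has_conflict_py (sources : List (List (String × String))) : Bool :=
  if sources.length ≤ 1 then false
  else
    let unique_values := sources.foldl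
      (fun (acc : PySem.Set String) source =>
        let value := pvNorm source
        if value ≠ "" then PySem.Set.add acc value else acc)
      PySem.Set.empty
    decide (1 < PySem.Set.len unique_values)

-- ===== PORT B =====
def pvAltGo (first : Option String) : List (List (String × String)) → Bool
  | [] => false
  | source :: rest =>
    let value := pvNorm source
    if value = "" then pvAltGo first rest
    else
      match first with
      | none => pvAltGo (some value) rest
      | some f => if value ≠ f then true else pvAltGo first rest

def has_conflict_py_alt (sources : List (List (String × String))) : Bool :=
  pvAltGo none sources

-- ===== PRECONDITION & SPEC =====
def Spec_has_conflict_py (sources : List (List (String × String))) (out : Bool) : Prop := out = has_conflict_py_alt sources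
instance (sources : List (List (String × String))) (out : Bool) : Decidable (Spec_has_conflict_py sources out) := by unfold Spec_has_conflict_py; infer_instance

-- ===== CLAIM (what is proved, stated in full; the proofs are below) =====
def Claim_equal_has_conflict_py : Prop := ∀ (sources : List (List (String × String))), Dom_has_conflict_py sources → Spec_has_conflict_py sources (has_conflict_py sources)

-- ===== LEMMAS AND PROOFS =====

-- A's set-accumulation loop, generalized over the starting set
def pvBuild (S : PySem.Set String) (l : List (List (String × String))) : PySem.Set String :=
  l.foldl
    (fun (acc : PySem.Set String) source =>
      let value := pvNorm source
      if value ≠ "" then PySem.Set.add acc value else acc)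
    S

theorem pvBuild_len_mono (l : List (List (String × String))) :
    ∀ S : PySem.Set String, S.length ≤ (pvBuild S l).length := by
  induction l with
  | nil => intro S; simp [pvBuild]
  | cons s rest ih =>
    intro S
    by_cases h : pvNorm s = ""
    · simpa [pvBuild, h] using ih S
    · have h2 : S.length ≤ (PySem.Set.add S (pvNorm s)).length := by
        simp only [PySem.Set.add]
        split <;> simp
      calc S.length ≤ (PySem.Set.add S (pvNorm s)).length := h2
        _ ≤ (pvBuild (PySem.Set.add S (pvNorm s)) rest).length := ih _
        _ = (pvBuild S (s :: rest)).length := by simp [pvBuild, h]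

theorem pvAltGo_some (l : List (List (String × String))) :
    ∀ f : String, pvAltGo (some f) l = decide (1 < (pvBuild [f] l).length) := by
  induction l with
  | nil => intro f; simp [pvAltGo, pvBuild]
  | cons s rest ih =>
    intro f
    by_cases h : pvNorm s = ""
    · simp [pvAltGo, pvBuild, h, ih f]
    · by_cases hf : pvNorm s = f
      · have hadd : PySem.Set.add [f] (pvNorm s) = [f] := by
          simp [PySem.Set.add, PySem.Set.contains, hf]
        simp [pvAltGo, pvBuild, hf, ih f]
      · have hadd : PySem.Set.add [f] (pvNorm s) = [f, pvNorm s] := by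
          simp [PySem.Set.add, PySem.Set.contains, hf]
        have hlen : 2 ≤ (pvBuild [f, pvNorm s] rest).length := by
          simpa using pvBuild_len_mono rest [f, pvNorm s]
        have : pvBuild [f] (s :: rest) = pvBuild [f, pvNorm s] rest := by
          simp [pvBuild, h, hadd]
        simp [pvAltGo, h, hf, this]
        omega

theorem pvAltGo_none (l : List (List (String × String))) :
    pvAltGo none l = decide (1 < (pvBuild [] l).length) := by
  induction l with
  | nil => simp [pvAltGo, pvBuild]
  | cons s rest ih =>
    by_cases h : pvNorm s = ""
    · simp [pvAltGo, pvBuild, h, ih]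
    · have : pvBuild [] (s :: rest) = pvBuild [pvNorm s] rest := by
        simp [pvBuild, h]
      simp [pvAltGo, h, this, pvAltGo_some rest (pvNorm s)]

-- ===== VERDICT (by name: the statement is the Claim_ definition above) =====
theorem has_conflict_py_spec : Claim_equal_has_conflict_py := by
  intro sources _
  unfold Spec_has_conflict_py has_conflict_py_alt has_conflict_py
  by_cases hlen : sources.length ≤ 1
  · simp only [hlen, if_true]
    match sources, hlen with
    | [], _ => rfl
    | [s], _ =>
      by_cases h : pvNorm s = "" <;> simp [pvAltGo, h]
  · simp only [hlen, if_false]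
    rw [pvAltGo_none]
    have hfold : sources.foldl
        (fun (acc : PySem.Set String) source =>
          let value := pvNorm source
          if value ≠ "" then PySem.Set.add acc value else acc)
        PySem.Set.empty = pvBuild [] sources := rfl
    simp only [hfold]
    rcases Nat.lt_or_ge 1 (pvBuild [] sources).length with h1 | h1
    · simp [PySem.Set.len, h1]
    · simp [PySem.Set.len]
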